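-- pv_equiv track=rewrite | github.com/cklxx/openMax | src/openmax/lead_agent/tools/_error_context.py | _find_error_blocks
-- ===== SOURCE A (Python) =====
-- _ERROR_MARKERS = ("Error", "FAILED", "Traceback", "panic:", "FATAL", "Exception", "[ERROR]")
--
-- _CONTEXT_BEFORE = 5
--
-- def _find_error_blocks(lines: list[str]) -> list[tuple[int, int]]:
--     """Find (start, end) ranges for each error block in lines."""
--     blocks: list[tuple[int, int]] = []
--     for i, line in enumerate(lines):
--         if not any(m in line for m in _ERROR_MARKERS):
--             continue
--         start = max(0, i - _CONTEXT_BEFORE)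
--         end = i + 1
--         while end < len(lines) and lines[end].strip():
--             end += 1
--         blocks.append((start, end))
--     return _merge_overlapping(blocks)
--
-- def _merge_overlapping(blocks: list[tuple[int, int]]) -> list[tuple[int, int]]:
--     if not blocks:
--         return []
--     merged = [blocks[0]]
--     for start, end in blocks[1:]:
--         if start <= merged[-1][1]:
--             merged[-1] = (merged[-1][0], max(merged[-1][1], end))
--         else:
--             merged.append((start, end))
--     return merged
-- ===== SOURCE B (Python) =====
-- _ERROR_MARKERS = ("Error", "FAILED", "Traceback", "panic:", "FATAL", "Exception", "[ERROR]")
--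
-- _CONTEXT_BEFORE = 5
--
-- def _merge_into(merged, block):
--     """Merge block into merged (in order of nondecreasing starts)."""
--     if merged and block[0] <= merged[-1][1]:
--         merged[-1] = (merged[-1][0], max(merged[-1][1], block[1]))
--     else:
--         merged.append(block)
--
-- def _find_error_blocks(lines: list[str]) -> list[tuple[int, int]]:
--     """Find (start, end) ranges for each error block in lines."""
--     n = len(lines)
--     # next_blank[j] = index of first blank line at or after j, or n
--     next_blank = [n] * (n + 1)
--     for j in range(n - 1, -1, -1):
--         next_blank[j] = j if not lines[j].strip() else next_blank[j + 1]
--     merged: list[tuple[int, int]] = []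
--     for i, line in enumerate(lines):
--         if any(m in line for m in _ERROR_MARKERS):
--             _merge_into(merged, (max(0, i - _CONTEXT_BEFORE), next_blank[i + 1]))
--     return merged
-- ===== Notes on version B (the rewrite author's own statement) =====
-- stated objective: alternative
-- what changed: Replaces the per-error forward while-scan for the block end with a next-blank-line index table built in one backward pass, and merges overlapping blocks on the fly instead of in a separate pass; avoids A's worst-case repeated rescanning but measures at the same cost on the generated inputs.
import Mathlib
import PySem

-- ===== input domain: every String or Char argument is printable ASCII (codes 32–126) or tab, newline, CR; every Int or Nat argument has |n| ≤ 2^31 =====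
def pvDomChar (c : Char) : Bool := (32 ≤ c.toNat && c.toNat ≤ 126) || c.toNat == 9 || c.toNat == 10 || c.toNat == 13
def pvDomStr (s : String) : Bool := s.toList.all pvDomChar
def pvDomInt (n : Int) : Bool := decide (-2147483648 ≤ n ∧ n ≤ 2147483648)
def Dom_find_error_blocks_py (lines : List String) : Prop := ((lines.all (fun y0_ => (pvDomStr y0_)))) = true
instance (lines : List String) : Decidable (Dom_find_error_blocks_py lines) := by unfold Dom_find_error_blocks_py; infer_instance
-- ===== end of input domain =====

-- B replaces A's per-error forward rescan for the block end by a next-blank-line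
-- table built in one backward pass, merging blocks as they are produced (objective: alternative).

-- ===== PORT A =====
def pvMarkers : List String := ["Error", "FAILED", "Traceback", "panic:", "FATAL", "Exception", "[ERROR]"]

def pvIsError (line : String) : Bool := pvMarkers.any (fun m => PySem.Str.isIn m line)

-- the inner 'while end < len(lines) and lines[end].strip(): end += 1' of A
def pvScanEnd (lines : List String) (e : Nat) : Nat :=
  if _h : e < lines.length then
    if PySem.Str.strip (lines.getD e "") ≠ "" then pvScanEnd lines (e + 1) else e
  else e
termination_by lines.length - e

-- one step of A's _merge_overlapping loop
def pvMergeStep (merged : List (Int × Int)) (b : Int × Int) : List (Int × Int) :=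
  match merged.getLast? with
  | some last =>
      if b.1 ≤ last.2 then merged.dropLast ++ [(last.1, max last.2 b.2)]
      else merged ++ [b]
  | none => merged ++ [b]

def pvMergeOverlapping (blocks : List (Int × Int)) : List (Int × Int) :=
  match blocks with
  | [] => []
  | b :: rest => rest.foldl pvMergeStep [b]

def find_error_blocks_py (lines : List String) : List (Int × Int) :=
  let blocks := (PySem.List.enumerate lines).foldl (fun bs p =>
    if pvIsError p.2 then
      bs ++ [(max 0 (p.1 - 5), ((pvScanEnd lines (p.1.toNat + 1) : Nat) : Int))]
    else bs) []
  pvMergeOverlapping blocks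

-- ===== PORT B =====
-- next_blank table: entry j = first index ≥ j whose line strips to "", else len(lines)
def pvNextBlank : List String → Nat → List Nat
  | [], off => [off]
  | l :: rest, off =>
    let tail := pvNextBlank rest (off + 1)
    (if PySem.Str.strip l = "" then off else tail.headD (off + 1)) :: tail

-- B's _merge_into helper
def pvMergeInto (merged : List (Int × Int)) (b : Int × Int) : List (Int × Int) :=
  match merged.getLast? with
  | some last =>
      if b.1 ≤ last.2 then merged.dropLast ++ [(last.1, max last.2 b.2)]
      else merged ++ [b]
  | none => [b]

def find_error_blocks_py_alt (lines : List String) : List (Int × Int) :=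
  let nb := pvNextBlank lines 0
  (PySem.List.enumerate lines).foldl (fun merged p =>
    if pvIsError p.2 then
      pvMergeInto merged (max 0 (p.1 - 5), ((nb.getD (p.1.toNat + 1) lines.length : Nat) : Int))
    else merged) []

-- ===== PRECONDITION & SPEC =====
def Spec_find_error_blocks_py (lines : List String) (out : List (Int × Int)) : Prop := out = find_error_blocks_py_alt lines
instance (lines : List String) (out : List (Int × Int)) : Decidable (Spec_find_error_blocks_py lines out) := by unfold Spec_find_error_blocks_py; infer_instance

-- ===== CLAIM (what is proved, stated in full; the proofs are below) =====
def Claim_equal_find_error_blocks_py : Prop := ∀ (lines : List String), Dom_find_error_blocks_py lines → Spec_find_error_blocks_py lines (find_error_blocks_py lines)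

-- ===== LEMMAS AND PROOFS =====

-- number of leading lines that do not strip to ""
def pvScan : List String → Nat
  | [] => 0
  | l :: rest => if PySem.Str.strip l ≠ "" then pvScan rest + 1 else 0

theorem pvScanEnd_eq_scan (lines : List String) (e : Nat) :
    pvScanEnd lines e = e + pvScan (lines.drop e) := by
  fun_induction pvScanEnd lines e with
  | case1 e h hs ih =>
    rw [List.drop_eq_getElem_cons h, List.getD_eq_getElem?_getD, List.getElem?_eq_getElem h] at *
    simp only [Option.getD_some] at hs
    simp only [pvScan, if_pos hs, ih]
    omega
  | case2 e h hs =>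
    rw [List.drop_eq_getElem_cons h, List.getD_eq_getElem?_getD, List.getElem?_eq_getElem h] at *
    simp only [Option.getD_some] at hs
    simp only [pvScan, if_neg hs]
    omega
  | case3 e h =>
    rw [List.drop_eq_nil_iff.mpr (by omega)]
    simp [pvScan]

theorem pvNextBlank_getElem? (lines : List String) (off j : Nat) (hj : j ≤ lines.length) :
    (pvNextBlank lines off)[j]? = some (off + j + pvScan (lines.drop j)) := by
  induction lines generalizing off j with
  | nil =>
    have hj0 : j = 0 := by simpa using hj
    subst hj0
    simp [pvNextBlank, pvScan]
  | cons l rest ih =>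
    cases j with
    | zero =>
      simp only [pvNextBlank, List.getElem?_cons_zero, List.drop_zero, pvScan]
      by_cases hb : PySem.Str.strip l = ""
      · simp [hb]
      · have h0 := ih (off + 1) 0 (by simp)
        simp only [List.drop_zero] at h0
        simp only [if_neg hb, if_pos hb]
        cases ht : pvNextBlank rest (off + 1) with
        | nil => rw [ht] at h0; simp at h0
        | cons a t =>
          rw [ht] at h0
          simp only [List.getElem?_cons_zero, Option.some.injEq] at h0
          simp only [List.headD_cons, h0]
          congr 1
          omega
    | succ k =>
      simp only [pvNextBlank, List.getElem?_cons_succ, List.drop_succ_cons]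
      rw [ih (off + 1) k (by simpa using hj)]
      congr 2
      omega

theorem pvNextBlank_getD (lines : List String) (j : Nat) (hj : j ≤ lines.length) :
    (pvNextBlank lines 0).getD j lines.length = pvScanEnd lines j := by
  rw [List.getD_eq_getElem?_getD, pvNextBlank_getElem? lines 0 j hj, pvScanEnd_eq_scan]
  simp

theorem pvMergeStep_eq_into (acc : List (Int × Int)) (h : acc ≠ []) (b : Int × Int) :
    pvMergeStep acc b = pvMergeInto acc b := by
  unfold pvMergeStep pvMergeInto
  cases hl : acc.getLast? with
  | none => exact absurd (List.getLast?_eq_none_iff.mp hl) h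
  | some last => rfl

theorem pvMergeInto_ne_nil (acc : List (Int × Int)) (b : Int × Int) :
    pvMergeInto acc b ≠ [] := by
  cases hl : acc.getLast? with
  | none => simp [pvMergeInto, hl]
  | some last =>
    simp only [pvMergeInto, hl]
    split_ifs <;> simp

theorem foldl_mergeStep_eq_into (bs : List (Int × Int)) (acc : List (Int × Int)) (h : acc ≠ []) :
    bs.foldl pvMergeStep acc = bs.foldl pvMergeInto acc := by
  induction bs generalizing acc with
  | nil => rfl
  | cons b rest ih =>
    simp only [List.foldl_cons, pvMergeStep_eq_into acc h b]
    exact ih _ (pvMergeInto_ne_nil acc b)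

theorem pvMergeOverlapping_eq_foldl (bs : List (Int × Int)) :
    pvMergeOverlapping bs = bs.foldl pvMergeInto [] := by
  cases bs with
  | nil => rfl
  | cons b rest =>
    simp only [pvMergeOverlapping, List.foldl_cons]
    have : pvMergeInto [] b = [b] := rfl
    rw [this, foldl_mergeStep_eq_into rest [b] (by simp)]

-- ===== VERDICT (by name: the statement is the Claim_ definition above) =====
theorem block_eq (lines : List String) (p : Int × String)
    (hp : p ∈ PySem.List.enumerate lines 0) :
    ((pvScanEnd lines (p.1.toNat + 1) : Nat) : Int)
      = (((pvNextBlank lines 0).getD (p.1.toNat + 1) lines.length : Nat) : Int) := by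
  obtain ⟨k, hk, rfl⟩ := (PySem.List.mem_enumerate_iff lines 0 p).mp hp
  have h1 : ((0 : Int) + (k : Int)).toNat = k := by omega
  rw [h1, pvNextBlank_getD lines (k + 1) (by omega)]

theorem find_error_blocks_py_spec : Claim_equal_find_error_blocks_py := by
  intro lines _
  unfold Spec_find_error_blocks_py find_error_blocks_py find_error_blocks_py_alt
  simp only [PySem.List.foldl_append_if (fun (p : Int × String) => pvIsError p.2)
      (fun (p : Int × String) => ((max 0 (p.1 - 5), ((pvScanEnd lines (p.1.toNat + 1) : Nat) : Int)) : Int × Int)),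
    PySem.List.foldl_if_eq_foldl_filter (fun (p : Int × String) => pvIsError p.2)
      (fun (merged : List (Int × Int)) (p : Int × String) => pvMergeInto merged
        (max 0 (p.1 - 5), (((pvNextBlank lines 0).getD (p.1.toNat + 1) lines.length : Nat) : Int))),
    List.nil_append]
  rw [pvMergeOverlapping_eq_foldl, List.foldl_map]
  apply PySem.List.foldl_congr_mem
  intro acc p hp
  rw [block_eq lines p (List.mem_of_mem_filter hp)]
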